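-- pv_equiv track=rewrite | github.com/scottpeterson/d3-bball-npi | myapp/team_id_getter.py | compare_team_mappings
-- ===== SOURCE A (Python) =====
-- from typing import Dict, Set, Tuple
--
-- def compare_team_mappings(massey_teams: Dict[str, str],
--                          existing_teams: Dict[str, str]) -> Tuple[Set[str], Set[str], Set[str]]:
--     """
--     Compare Massey teams with existing mappings.
--
--     Returns:
--         Tuple of (new_teams, missing_teams, differing_names)
--     """
--     massey_ids = set(massey_teams.keys())
--     existing_ids = set(existing_teams.keys())
--
--     # Find teams in Massey but not in existing
--     new_teams = massey_ids - existing_ids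
--
--     # Find teams in existing but not in Massey
--     missing_teams = existing_ids - massey_ids
--
--     # Find teams with different names
--     differing_names = set()
--     for team_id in massey_ids & existing_ids:
--         if massey_teams[team_id] != existing_teams[team_id]:
--             differing_names.add(team_id)
--
--     return new_teams, missing_teams, differing_names
-- ===== SOURCE B (Python) =====
-- def compare_team_mappings(massey_teams, existing_teams):
--     """Build one outer-join table keyed by team id, then classify each row once."""
--     joined = {}
--     for team_id, name in massey_teams.items():
--         joined[team_id] = (name, None)
--     for team_id, name in existing_teams.items():
--         massey_name = joined[team_id][0] if team_id in joined else None
--         joined[team_id] = (massey_name, name)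
--     new_teams, missing_teams, differing_names = set(), set(), set()
--     for team_id, row in joined.items():
--         massey_name, existing_name = row
--         if existing_name is None:
--             new_teams.add(team_id)
--         elif massey_name is None:
--             missing_teams.add(team_id)
--         elif massey_name != existing_name:
--             differing_names.add(team_id)
--     return new_teams, missing_teams, differing_names
-- ===== Notes on version B (the rewrite author's own statement) =====
-- stated objective: alternative
-- what changed: Instead of A's set algebra on the two key sets (two set differences plus a scan of the intersection with lookups into both dicts), B builds one outer-join dict mapping each team id to the pair (massey name or None, existing name or None) in two fill passes, then classifies every joined row once by a three-way test on which names are present and whether they agree.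
import Mathlib
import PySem

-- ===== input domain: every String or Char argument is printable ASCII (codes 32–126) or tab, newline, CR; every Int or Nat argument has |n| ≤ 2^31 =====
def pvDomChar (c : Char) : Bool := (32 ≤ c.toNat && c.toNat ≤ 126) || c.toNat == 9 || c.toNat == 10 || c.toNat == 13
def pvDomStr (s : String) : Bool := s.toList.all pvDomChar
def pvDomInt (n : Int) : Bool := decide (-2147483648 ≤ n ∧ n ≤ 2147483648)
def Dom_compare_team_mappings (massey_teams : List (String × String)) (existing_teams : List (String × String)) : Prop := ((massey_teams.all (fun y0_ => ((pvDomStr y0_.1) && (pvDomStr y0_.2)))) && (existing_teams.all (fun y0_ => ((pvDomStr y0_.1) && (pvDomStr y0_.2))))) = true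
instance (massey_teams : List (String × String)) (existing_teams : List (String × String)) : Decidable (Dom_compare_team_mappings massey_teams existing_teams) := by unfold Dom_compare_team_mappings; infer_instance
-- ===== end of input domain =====

-- B replaces A's key-set algebra (two set differences plus an intersection scan) by a
-- different data structure: one outer-join dict keyed by team id holding the pair of
-- optional names from both sides, classified row by row in a single final pass
-- (objective: alternative; same asymptotic cost). The returned Python sets are
-- PySem.Set lists, compared as finite sets.

-- ===== PORT A =====
def compare_team_mappings (massey_teams : List (String × String)) (existing_teams : List (String × String)) : List String × List String × List String :=
  let massey_ids : PySem.Set String := PySem.Set.ofList (massey_teams.map Prod.fst)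
  let existing_ids : PySem.Set String := PySem.Set.ofList (existing_teams.map Prod.fst)
  let new_teams := PySem.Set.diff massey_ids existing_ids
  let missing_teams := PySem.Set.diff existing_ids massey_ids
  let differing_names :=
    (PySem.Set.inter massey_ids existing_ids).foldl
      (fun acc team_id =>
        if (PySem.Dict.mk massey_teams).get? team_id ≠ (PySem.Dict.mk existing_teams).get? team_id
        then PySem.Set.add acc team_id else acc)
      PySem.Set.empty
  (new_teams, missing_teams, differing_names)

-- ===== PORT B =====
-- B-side helper: one step of the second join loop ('joined[k] = (joined[k][0] if k in joined else None, v)')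
def pvJoinStep (d : PySem.Dict String (Option String × Option String)) (p : String × String) :
    PySem.Dict String (Option String × Option String) :=
  let massey_name : Option String :=
    if d.contains p.1 then ((d.get? p.1).getD (none, none)).1 else none
  d.insert p.1 (massey_name, some p.2)

-- B-side helper: the three-way classification of one joined row
def pvClassStep (acc : PySem.Set String × PySem.Set String × PySem.Set String)
    (r : String × (Option String × Option String)) :
    PySem.Set String × PySem.Set String × PySem.Set String :=
  match r.2 with
  | (_, none) => (PySem.Set.add acc.1 r.1, acc.2.1, acc.2.2)
  | (none, some _) => (acc.1, PySem.Set.add acc.2.1 r.1, acc.2.2)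
  | (some mn, some en) =>
      if mn ≠ en then (acc.1, acc.2.1, PySem.Set.add acc.2.2 r.1) else acc

def compare_team_mappings_alt (massey_teams : List (String × String)) (existing_teams : List (String × String)) : List String × List String × List String :=
  let joined0 : PySem.Dict String (Option String × Option String) :=
    massey_teams.foldl (fun d p => d.insert p.1 (some p.2, none)) PySem.Dict.empty
  let joined := existing_teams.foldl pvJoinStep joined0
  let res := joined.items.foldl pvClassStep (PySem.Set.empty, PySem.Set.empty, PySem.Set.empty)
  res

-- ===== PRECONDITION & SPEC =====
-- The List-encoded arguments stand for Python dicts, whose keys are unique; an association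
-- list with a duplicated key encodes no Python dict, so such lists are outside the claim.
def Pre_compare_team_mappings (massey_teams : List (String × String)) (existing_teams : List (String × String)) : Prop :=
  (massey_teams.map Prod.fst).Nodup ∧ (existing_teams.map Prod.fst).Nodup
instance (massey_teams : List (String × String)) (existing_teams : List (String × String)) : Decidable (Pre_compare_team_mappings massey_teams existing_teams) := by unfold Pre_compare_team_mappings; infer_instance

def pvWitness_compare_team_mappings : (List (String × String)) × (List (String × String)) :=
  ([("1", "Alpha"), ("2", "Beta")], [("2", "Gamma"), ("3", "Delta")])

def Spec_compare_team_mappings (massey_teams : List (String × String)) (existing_teams : List (String × String)) (out : List String × List String × List String) : Prop := out = compare_team_mappings_alt massey_teams existing_teams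
instance (massey_teams : List (String × String)) (existing_teams : List (String × String)) (out : List String × List String × List String) : Decidable (Spec_compare_team_mappings massey_teams existing_teams out) := by unfold Spec_compare_team_mappings; infer_instance

-- ===== CLAIM (what is proved, stated in full; the proofs are below) =====
def Claim_equal_compare_team_mappings : Prop := ∀ (massey_teams : List (String × String)) (existing_teams : List (String × String)), Dom_compare_team_mappings massey_teams existing_teams → Pre_compare_team_mappings massey_teams existing_teams → Spec_compare_team_mappings massey_teams existing_teams (compare_team_mappings massey_teams existing_teams)

-- ===== LEMMAS AND PROOFS =====
-- Bool predicates naming the classification of massey rows against existing_teams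
def isNewB (e : List (String × String)) (p : String × String) : Bool :=
  ((PySem.Dict.mk e).get? p.1).isNone
def isDifB (e : List (String × String)) (p : String × String) : Bool :=
  match (PySem.Dict.mk e).get? p.1 with
  | none => false
  | some w => w != p.2

theorem pv_get?_none (e : List (String × String)) (k : String) :
    ((PySem.Dict.mk e).get? k).isNone = !(List.contains (e.map Prod.fst) k) := by
  induction e with
  | nil => rfl
  | cons p t ih =>
    by_cases h : p.1 = k
    · simp [PySem.Dict.get?, List.find?, h]
    · have hb : (p.1 == k) = false := by simp [h]
      have hb2 : (k == p.1) = false := by simp [Ne.symm h]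
      simpa [PySem.Dict.get?, List.find?, hb, hb2] using ih

theorem pv_get?_self {m : List (String × String)} {p : String × String}
    (hnd : (m.map Prod.fst).Nodup) (hp : p ∈ m) :
    (PySem.Dict.mk m).get? p.1 = some p.2 := by
  induction m with
  | nil => cases hp
  | cons q t ih =>
    simp only [List.map_cons, List.nodup_cons] at hnd
    rcases List.mem_cons.mp hp with h | h
    · subst h; simp [PySem.Dict.get?, List.find?]
    · have hne : q.1 ≠ p.1 := by
        intro he
        exact hnd.1 (he ▸ List.mem_map_of_mem h)
      have hb : (q.1 == p.1) = false := by simp [hne]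
      simpa [PySem.Dict.get?, List.find?, hb] using ih hnd.2 h

theorem pv_add_fresh {s : List String} {x : String} (hx : x ∉ s) :
    PySem.Set.add s x = s ++ [x] := by
  simp [PySem.Set.add, PySem.Set.contains, hx]

theorem pv_ofList_aux (xs : List String) (s : List String)
    (hs : ∀ k ∈ xs, k ∉ s) (hnd : xs.Nodup) :
    xs.foldl PySem.Set.add s = s ++ xs := by
  induction xs generalizing s with
  | nil => simp
  | cons x t ih =>
    simp only [List.nodup_cons] at hnd
    have hfresh : ∀ k ∈ t, k ∉ s ++ [x] := by
      intro k hk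
      simp only [List.mem_append, List.mem_singleton]
      rintro (h | h)
      · exact hs k (by simp [hk]) h
      · exact hnd.1 (h ▸ hk)
    rw [List.foldl_cons, pv_add_fresh (hs x (by simp)), ih (s ++ [x]) hfresh hnd.2]
    simp

theorem pv_ofList_nodup {xs : List String} (h : xs.Nodup) : PySem.Set.ofList xs = xs := by
  simpa using pv_ofList_aux xs [] (by simp) h

theorem pv_foldl_add_if (ks : List String) (cond : String → Prop) [DecidablePred cond]
    (s : List String) (hnd : ks.Nodup) (hs : ∀ k ∈ ks, k ∉ s) :
    ks.foldl (fun acc k => if cond k then PySem.Set.add acc k else acc) s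
      = s ++ ks.filter (fun k => decide (cond k)) := by
  induction ks generalizing s with
  | nil => simp
  | cons x t ih =>
    simp only [List.nodup_cons] at hnd
    have hs' : ∀ k ∈ t, k ∉ s := fun k hk => hs k (by simp [hk])
    by_cases hc : cond x
    · have hfresh : ∀ k ∈ t, k ∉ s ++ [x] := by
        intro k hk
        simp only [List.mem_append, List.mem_singleton]
        rintro (h | h)
        · exact hs k (by simp [hk]) h
        · exact hnd.1 (h ▸ hk)
      simp only [List.foldl_cons, if_pos hc, pv_add_fresh (hs x (by simp))]
      rw [ih (s ++ [x]) hnd.2 hfresh]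
      simp [hc]
    · simp only [List.foldl_cons, if_neg hc]
      rw [ih s hnd.2 hs']
      simp [hc]

-- the outer-join loop, characterised: existing entries update massey rows in place,
-- fresh existing keys append (none, name) rows
theorem pv_join_items (e : List (String × String))
    (d : PySem.Dict String (Option String × Option String))
    (he : (e.map Prod.fst).Nodup) (hd : d.keys.Nodup) :
    (e.foldl pvJoinStep d).items =
      d.items.map (fun r =>
        match (PySem.Dict.mk e).get? r.1 with
        | none => r
        | some w => (r.1, (r.2.1, some w)))
      ++ (e.filter (fun p => !(d.contains p.1))).map
          (fun p => (p.1, ((none : Option String), some p.2))) := by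
  induction e generalizing d hd with
  | nil =>
    simp [PySem.Dict.get?]
  | cons q t ih =>
    simp only [List.map_cons, List.nodup_cons] at he
    obtain ⟨hq, ht⟩ := he
    have hd' : (pvJoinStep d q).keys.Nodup := by
      unfold pvJoinStep; exact PySem.Dict.nodup_keys_insert _ _ _ hd
    rw [List.foldl_cons, ih _ ht hd']
    have hfilt : t.filter (fun p => !((pvJoinStep d q).contains p.1))
        = t.filter (fun p => !(d.contains p.1)) := by
      apply List.filter_congr
      intro p hp
      have hne : (p.1 == q.1) = false := by
        simp only [beq_eq_false_iff_ne, ne_eq]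
        intro h; exact hq (h ▸ List.mem_map_of_mem hp)
      unfold pvJoinStep
      rw [PySem.Dict.contains_insert, hne]
      simp
    rw [hfilt]
    by_cases hc : d.contains q.1 = true
    · have hmv : pvJoinStep d q
          = d.insert q.1 (((d.get? q.1).getD (none, none)).1, some q.2) := by
        unfold pvJoinStep; rw [if_pos hc]
      rw [hmv, PySem.Dict.items_insert_of_contains d _ hc]
      have hfq : (q :: t).filter (fun p => !(d.contains p.1))
          = t.filter (fun p => !(d.contains p.1)) := by
        simp [hc]
      rw [hfq, List.map_map]
      congr 1
      apply List.map_congr_left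
      intro r hr
      have hget : d.get? r.1 = some r.2 :=
        PySem.Dict.get?_of_mem_items d (by simpa using hr) hd
      by_cases h1 : r.1 = q.1
      · have hb : (r.1 == q.1) = true := by simp [h1]
        have hnone : (PySem.Dict.mk t).get? q.1 = none := by
          rw [PySem.Dict.get?_eq_none_iff_not_mem_keys]
          simpa [PySem.Dict.keys] using hq
        have hcons : (PySem.Dict.mk (q :: t)).get? r.1 = some q.2 := by
          rw [PySem.Dict.get?_mk_cons]
          simp [h1]
        simp only [Function.comp_apply, hb, hcons]
        rw [h1] at hget
        simp [hget, h1, hnone]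
      · have hb : (r.1 == q.1) = false := by simp [h1]
        have hcons : (PySem.Dict.mk (q :: t)).get? r.1 = (PySem.Dict.mk t).get? r.1 := by
          rw [PySem.Dict.get?_mk_cons]
          simp [Ne.symm h1]
        simp only [Function.comp_apply, hb, hcons]
        simp
    · have hcf : d.contains q.1 = false := by simpa using hc
      have hmv : pvJoinStep d q = d.insert q.1 (none, some q.2) := by
        unfold pvJoinStep; rw [if_neg (by simp [hcf])]
      rw [hmv, PySem.Dict.items_insert_of_not_contains d _ hcf]
      have hfq : (q :: t).filter (fun p => !(d.contains p.1))
          = q :: t.filter (fun p => !(d.contains p.1)) := by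
        simp [hcf]
      rw [hfq, List.map_append]
      have hnone : (PySem.Dict.mk t).get? q.1 = none := by
        rw [PySem.Dict.get?_eq_none_iff_not_mem_keys]
        simpa [PySem.Dict.keys] using hq
      have hmapeq : d.items.map (fun r =>
          match (PySem.Dict.mk t).get? r.1 with
          | none => r
          | some w => (r.1, (r.2.1, some w)))
        = d.items.map (fun r =>
          match (PySem.Dict.mk (q :: t)).get? r.1 with
          | none => r
          | some w => (r.1, (r.2.1, some w))) := by
        apply List.map_congr_left
        intro r hr
        have hrk : r.1 ∈ d.keys := by
          simp only [PySem.Dict.keys]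
          exact List.mem_map_of_mem hr
        have h1 : r.1 ≠ q.1 := by
          intro h
          have := (PySem.Dict.contains_iff_mem_keys d q.1).mpr (h ▸ hrk)
          rw [hcf] at this; cases this
        have hcons : (PySem.Dict.mk (q :: t)).get? r.1 = (PySem.Dict.mk t).get? r.1 := by
          rw [PySem.Dict.get?_mk_cons]
          simp [Ne.symm h1]
        rw [hcons]
      rw [hmapeq]
      simp [hnone]

-- classification of the massey-side rows
theorem pv_class_m (rows : List (String × String)) (e : List (String × String))
    (s1 s3 : PySem.Set String) (s2 : PySem.Set String)
    (hnd : (rows.map Prod.fst).Nodup)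
    (h1 : ∀ k ∈ rows.map Prod.fst, k ∉ s1) (h3 : ∀ k ∈ rows.map Prod.fst, k ∉ s3) :
    (rows.map (fun p => (p.1, ((some p.2 : Option String), (PySem.Dict.mk e).get? p.1)))).foldl
        pvClassStep (s1, s2, s3)
      = (s1 ++ (rows.filter (isNewB e)).map Prod.fst, s2,
         s3 ++ (rows.filter (isDifB e)).map Prod.fst) := by
  induction rows generalizing s1 s3 with
  | nil => simp
  | cons p t ih =>
    simp only [List.map_cons, List.nodup_cons] at hnd
    obtain ⟨hp, ht⟩ := hnd
    have h1' : ∀ k ∈ t.map Prod.fst, k ∉ s1 := fun k hk => h1 k (by simp [hk])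
    have h3' : ∀ k ∈ t.map Prod.fst, k ∉ s3 := fun k hk => h3 k (by simp [hk])
    have hf1 : ∀ k ∈ t.map Prod.fst, k ∉ s1 ++ [p.1] := by
      intro k hk
      simp only [List.mem_append, List.mem_singleton]
      rintro (h | h)
      · exact h1 k (by simp [hk]) h
      · exact hp (h ▸ hk)
    have hf3 : ∀ k ∈ t.map Prod.fst, k ∉ s3 ++ [p.1] := by
      intro k hk
      simp only [List.mem_append, List.mem_singleton]
      rintro (h | h)
      · exact h3 k (by simp [hk]) h
      · exact hp (h ▸ hk)
    rw [List.map_cons, List.foldl_cons]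
    cases hg : (PySem.Dict.mk e).get? p.1 with
    | none =>
      have hstep : pvClassStep (s1, s2, s3) (p.1, (some p.2, (none : Option String)))
          = (PySem.Set.add s1 p.1, s2, s3) := rfl
      rw [hstep, pv_add_fresh (h1 p.1 (by simp)), ih _ _ ht hf1 h3']
      simp [isNewB, isDifB, hg]
    | some w =>
      by_cases hw : p.2 = w
      · have hstep : pvClassStep (s1, s2, s3) (p.1, (some p.2, some w))
            = (s1, s2, s3) := by
          simp [pvClassStep, hw]
        rw [hstep, ih _ _ ht h1' h3']
        simp [isNewB, isDifB, hg, hw]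
      · have hstep : pvClassStep (s1, s2, s3) (p.1, (some p.2, some w))
            = (s1, s2, PySem.Set.add s3 p.1) := by
          simp [pvClassStep, hw]
        rw [hstep, pv_add_fresh (h3 p.1 (by simp)), ih _ _ ht h1' hf3]
        simp [isNewB, isDifB, hg, Ne.symm hw]

-- classification of the appended existing-only rows
theorem pv_class_e (rows : List (String × String))
    (s1 s2 s3 : PySem.Set String)
    (hnd : (rows.map Prod.fst).Nodup) (h2 : ∀ k ∈ rows.map Prod.fst, k ∉ s2) :
    (rows.map (fun p => (p.1, ((none : Option String), some p.2)))).foldl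
        pvClassStep (s1, s2, s3)
      = (s1, s2 ++ rows.map Prod.fst, s3) := by
  induction rows generalizing s2 with
  | nil => simp
  | cons p t ih =>
    simp only [List.map_cons, List.nodup_cons] at hnd
    obtain ⟨hp, ht⟩ := hnd
    have hf2 : ∀ k ∈ t.map Prod.fst, k ∉ s2 ++ [p.1] := by
      intro k hk
      simp only [List.mem_append, List.mem_singleton]
      rintro (h | h)
      · exact h2 k (by simp [hk]) h
      · exact hp (h ▸ hk)
    rw [List.map_cons, List.foldl_cons]
    have hstep : pvClassStep (s1, s2, s3) (p.1, ((none : Option String), some p.2))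
        = (s1, PySem.Set.add s2 p.1, s3) := rfl
    rw [hstep, pv_add_fresh (h2 p.1 (by simp)), ih _ ht hf2]
    simp

theorem pv_alt_eq (m e : List (String × String))
    (hm : (m.map Prod.fst).Nodup) (he : (e.map Prod.fst).Nodup) :
    compare_team_mappings_alt m e
      = ((m.filter (isNewB e)).map Prod.fst,
         (e.map Prod.fst).filter (fun k => !(List.contains (m.map Prod.fst) k)),
         (m.filter (isDifB e)).map Prod.fst) := by
  have hj0 : (List.foldl (fun d p => d.insert p.1 ((some p.2 : Option String), (none : Option String))) PySem.Dict.empty m).items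
      = m.map (fun p => (p.1, ((some p.2 : Option String), (none : Option String)))) := by
    rw [PySem.Dict.items_foldl_insert_fresh m Prod.fst _ _ (fun a _ => by simp) hm]
    simp [PySem.Dict.empty]
  have hj0k : (List.foldl (fun d p => d.insert p.1 ((some p.2 : Option String), (none : Option String))) PySem.Dict.empty m).keys.Nodup := by
    rw [PySem.Dict.keys, hj0, List.map_map]
    simpa [Function.comp] using hm
  have hcont : ∀ p : String × String,
      (List.foldl (fun d p => d.insert p.1 ((some p.2 : Option String), (none : Option String))) PySem.Dict.empty m).contains p.1
        = List.contains (m.map Prod.fst) p.1 := by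
    intro p
    rw [PySem.Dict.contains_eq_decide_mem_keys, PySem.Dict.keys, hj0, List.map_map]
    simp [Function.comp]
  simp only [compare_team_mappings_alt]
  rw [pv_join_items e _ he hj0k, hj0]
  have hrows : (m.map (fun p => (p.1, ((some p.2 : Option String), (none : Option String))))).map
        (fun r => match (PySem.Dict.mk e).get? r.1 with
                  | none => r
                  | some w => (r.1, (r.2.1, some w)))
      = m.map (fun p => (p.1, ((some p.2 : Option String), (PySem.Dict.mk e).get? p.1))) := by
    rw [List.map_map]
    apply List.map_congr_left
    intro p _
    cases hg : (PySem.Dict.mk e).get? p.1 <;> simp [hg]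
  have hfilt : e.filter (fun p => !((List.foldl (fun d p => d.insert p.1 ((some p.2 : Option String), (none : Option String))) PySem.Dict.empty m).contains p.1))
      = e.filter (fun p => !(List.contains (m.map Prod.fst) p.1)) :=
    List.filter_congr (fun p _ => by rw [hcont])
  rw [hrows, hfilt, List.foldl_append]
  rw [pv_class_m m e PySem.Set.empty PySem.Set.empty PySem.Set.empty hm
        (by simp [PySem.Set.empty]) (by simp [PySem.Set.empty])]
  have hnd2 : ((e.filter (fun p => !(List.contains (m.map Prod.fst) p.1))).map Prod.fst).Nodup :=
    (List.Sublist.map Prod.fst List.filter_sublist).nodup he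
  rw [pv_class_e (e.filter (fun p => !(List.contains (m.map Prod.fst) p.1))) _ _ _ hnd2
        (by simp [PySem.Set.empty])]
  refine Prod.ext (by simp [PySem.Set.empty]) (Prod.ext ?_ (by simp [PySem.Set.empty]))
  show PySem.Set.empty ++ _ = _
  rw [List.filter_map]
  simp only [PySem.Set.empty, List.nil_append]
  exact congrArg _ (List.filter_congr fun p _ => rfl)

theorem pv_a_eq (m e : List (String × String))
    (hm : (m.map Prod.fst).Nodup) (he : (e.map Prod.fst).Nodup) :
    compare_team_mappings m e
      = ((m.filter (isNewB e)).map Prod.fst,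
         (e.map Prod.fst).filter (fun k => !(List.contains (m.map Prod.fst) k)),
         (m.filter (isDifB e)).map Prod.fst) := by
  simp only [compare_team_mappings]
  rw [pv_ofList_nodup hm, pv_ofList_nodup he]
  rw [pv_foldl_add_if (PySem.Set.inter (m.map Prod.fst) (e.map Prod.fst))
        (fun k => (PySem.Dict.mk m).get? k ≠ (PySem.Dict.mk e).get? k) PySem.Set.empty
        (List.Nodup.filter _ hm) (by simp [PySem.Set.empty])]
  refine Prod.ext ?_ (Prod.ext ?_ ?_)
  · -- new teams
    simp only [PySem.Set.diff]
    rw [List.filter_map]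
    refine congrArg _ (List.filter_congr ?_)
    intro p hp
    simp only [Function.comp, isNewB, pv_get?_none, PySem.Set.contains]
  · -- missing teams
    simp [PySem.Set.diff, PySem.Set.contains]
  · -- differing names
    simp only [PySem.Set.inter, PySem.Set.empty, List.nil_append, List.filter_filter]
    rw [List.filter_map]
    refine congrArg _ (List.filter_congr ?_)
    intro p hp
    have hgm : (PySem.Dict.mk m).get? p.1 = some p.2 := pv_get?_self hm hp
    simp only [Function.comp]
    cases hg : (PySem.Dict.mk e).get? p.1 with
    | none =>
      have hc : List.contains (e.map Prod.fst) p.1 = false := by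
        have h2 := pv_get?_none e p.1
        rw [hg] at h2
        simpa using h2.symm
      have hnm : p.1 ∉ e.map Prod.fst := by
        intro hmem
        rw [List.contains_iff_mem.mpr hmem] at hc
        cases hc
      simp [PySem.Set.contains, hnm, isDifB, hg]
    | some w =>
      have hmem : p.1 ∈ e.map Prod.fst := by
        have h2 := pv_get?_none e p.1
        rw [hg] at h2
        simp at h2
        obtain ⟨x, hx⟩ := h2
        exact (show ((p.1, x) : String × String).1 ∈ _ from List.mem_map_of_mem hx)
      simp [PySem.Set.contains, hmem, isDifB, hg, hgm, bne, eq_comm]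
      rw [Bool.eq_iff_iff]
      simp

-- ===== VERDICT (by name: the statement is the Claim_ definition above) =====
theorem compare_team_mappings_spec : Claim_equal_compare_team_mappings := by
  intro m e _ hpre
  show _ = _
  rw [pv_a_eq m e hpre.1 hpre.2, pv_alt_eq m e hpre.1 hpre.2]
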